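-- pv_equiv track=rewrite | github.com/ProyectoIntegrador2018/STTA | back-end/STTEAPI/controllers/documento.py | get_last_valid_pass
-- ===== SOURCE A (Python) =====
-- def get_last_valid_pass(contenido):
--     p_ok = 0
--     p = 1
--     while (('paso_' + str(p)) in contenido):
--         if contenido['paso_' + str(p)] == 'ok':
--             p_ok = p
--         p = p + 1
--     return p_ok
-- ===== SOURCE B (Python) =====
-- def get_last_valid_pass(contenido):
--     # Phase 1: count n = number of contiguous present keys paso_1..paso_n.
--     n = 0
--     while ('paso_' + str(n + 1)) in contenido:
--         n += 1
--     # Phase 2: backward search with early exit for the last 'ok'.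
--     for p in range(n, 0, -1):
--         if contenido['paso_' + str(p)] == 'ok':
--             return p
--     return 0
-- ===== Notes on version B (the rewrite author's own statement) =====
-- stated objective: alternative
-- what changed: Replaced A's single forward scan that tracks the last 'ok' index in an accumulator by a two-phase method: first count the contiguous present keys, then search backward from the end and return at the first 'ok'.
import Mathlib
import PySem

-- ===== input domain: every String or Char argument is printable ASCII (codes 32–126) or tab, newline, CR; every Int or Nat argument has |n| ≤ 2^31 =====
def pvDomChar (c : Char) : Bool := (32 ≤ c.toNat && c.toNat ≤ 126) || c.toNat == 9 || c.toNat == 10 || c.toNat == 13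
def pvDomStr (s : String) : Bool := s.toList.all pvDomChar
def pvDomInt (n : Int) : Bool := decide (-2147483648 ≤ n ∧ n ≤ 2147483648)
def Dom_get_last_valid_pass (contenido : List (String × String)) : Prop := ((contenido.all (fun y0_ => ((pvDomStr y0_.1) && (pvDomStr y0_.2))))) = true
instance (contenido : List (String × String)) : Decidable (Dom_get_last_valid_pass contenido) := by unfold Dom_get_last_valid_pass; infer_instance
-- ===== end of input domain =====

-- B replaces A's forward scan with a last-'ok' accumulator by a two-phase count-then-backward
-- search with early exit; same cost, different decomposition.

-- ===== PORT A =====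
-- A's while loop: fuel contenido.length + 1 suffices, since the keys 'paso_1'…'paso_k' are
-- distinct, so at most contenido.length consecutive lookups can succeed.
def getLastValidPassLoopA (c : List (String × String)) : Nat → Int → Int → Int
  | 0, p_ok, _ => p_ok
  | fuel + 1, p_ok, p =>
    match c.lookup ("paso_" ++ PySem.Int.toStr p) with
    | none => p_ok
    | some v => getLastValidPassLoopA c fuel (if v = "ok" then p else p_ok) (p + 1)

def get_last_valid_pass (contenido : List (String × String)) : Int :=
  getLastValidPassLoopA contenido (contenido.length + 1) 0 1

-- ===== PORT B =====
-- phase 1: n = number of contiguous present keys paso_1..paso_n (same fuel bound as A's loop)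
def getLastValidPassCountB (c : List (String × String)) : Nat → Int → Int
  | 0, n => n
  | fuel + 1, n =>
    if (c.lookup ("paso_" ++ PySem.Int.toStr (n + 1))).isSome then
      getLastValidPassCountB c fuel (n + 1)
    else n

-- phase 2: for p in range(n, 0, -1) with early return; the range has exactly n.toNat elements
def getLastValidPassBackB (c : List (String × String)) : Int → Nat → Int
  | _, 0 => 0
  | p, fuel + 1 =>
    if c.lookup ("paso_" ++ PySem.Int.toStr p) = some "ok" then p
    else getLastValidPassBackB c (p - 1) fuel

def get_last_valid_pass_alt (contenido : List (String × String)) : Int :=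
  let n := getLastValidPassCountB contenido (contenido.length + 1) 0
  getLastValidPassBackB contenido n n.toNat

-- ===== PRECONDITION & SPEC =====
def Spec_get_last_valid_pass (contenido : List (String × String)) (out : Int) : Prop := out = get_last_valid_pass_alt contenido
instance (contenido : List (String × String)) (out : Int) : Decidable (Spec_get_last_valid_pass contenido out) := by unfold Spec_get_last_valid_pass; infer_instance

-- ===== CLAIM (what is proved, stated in full; the proofs are below) =====
def Claim_equal_get_last_valid_pass : Prop := ∀ (contenido : List (String × String)), Dom_get_last_valid_pass contenido → Spec_get_last_valid_pass contenido (get_last_valid_pass contenido)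

-- ===== LEMMAS AND PROOFS =====

-- proof-only generalisation of the backward search: default value acc instead of 0
def gBack (c : List (String × String)) (acc : Int) : Int → Nat → Int
  | _, 0 => acc
  | p, fuel + 1 =>
    if c.lookup ("paso_" ++ PySem.Int.toStr p) = some "ok" then p
    else gBack c acc (p - 1) fuel

theorem gBack_succ (c : List (String × String)) (acc p : Int) (f : Nat) :
    gBack c acc p (f + 1) =
      if c.lookup ("paso_" ++ PySem.Int.toStr p) = some "ok" then p
      else gBack c acc (p - 1) f := rfl

theorem backB_eq_gBack (c : List (String × String)) :
    ∀ (f : Nat) (p : Int), getLastValidPassBackB c p f = gBack c 0 p f := by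
  intro f
  induction f with
  | zero => intro p; rfl
  | succ f ih =>
    intro p
    rw [gBack_succ]
    show (if _ then _ else getLastValidPassBackB c (p - 1) f) = _
    rw [ih (p - 1)]

-- peeling the BOTTOM step of a backward search into the default value
theorem gBack_bottom (c : List (String × String)) :
    ∀ (k : Nat) (n acc : Int),
      gBack c acc n (k + 1) =
        gBack c (if c.lookup ("paso_" ++ PySem.Int.toStr (n - k)) = some "ok" then n - k else acc) n k := by
  intro k
  induction k with
  | zero =>
    intro n acc
    rw [gBack_succ]
    norm_num [gBack]
  | succ k ih =>
    intro n acc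
    rw [gBack_succ c acc n (k + 1), gBack_succ c _ n k]
    by_cases h : c.lookup ("paso_" ++ PySem.Int.toStr n) = some "ok"
    · simp [h]
    · simp only [if_neg h]
      rw [ih (n - 1) acc]
      have : n - 1 - (k : Int) = n - ((k : Nat) + 1 : Nat) := by push_cast; ring
      rw [this]

-- main invariant: A's loop from index n+1 equals the backward search over the keys it visits
theorem loopA_eq (c : List (String × String)) :
    ∀ (f : Nat) (n acc : Int),
      ∃ k : Nat, getLastValidPassCountB c f n = n + k ∧
        getLastValidPassLoopA c f acc (n + 1) = gBack c acc (n + k) k := by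
  intro f
  induction f with
  | zero =>
    intro n acc
    exact ⟨0, by simp [getLastValidPassCountB, getLastValidPassLoopA, gBack]⟩
  | succ f ih =>
    intro n acc
    simp only [getLastValidPassCountB, getLastValidPassLoopA]
    cases hl : c.lookup ("paso_" ++ PySem.Int.toStr (n + 1)) with
    | none =>
      refine ⟨0, by simp, ?_⟩
      simp [gBack]
    | some v =>
      obtain ⟨k, hcnt, hloop⟩ := ih (n + 1) (if v = "ok" then n + 1 else acc)
      refine ⟨k + 1, ?_, ?_⟩
      · simp only [Option.isSome_some, if_true, hcnt]
        push_cast; ring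
      · show getLastValidPassLoopA c f (if v = "ok" then n + 1 else acc) (n + 1 + 1) = _
        have hidx : (n + ((k : Nat) + 1 : Nat) : Int) = n + 1 + k := by push_cast; ring
        rw [hidx, gBack_bottom c k (n + 1 + k) acc,
            show (n + 1 + (k : Int)) - k = n + 1 by ring, hl]
        simp only [Option.some.injEq]
        exact hloop

-- ===== VERDICT (by name: the statement is the Claim_ definition above) =====
theorem get_last_valid_pass_spec : Claim_equal_get_last_valid_pass := by
  intro c _
  unfold Spec_get_last_valid_pass get_last_valid_pass get_last_valid_pass_alt
  obtain ⟨k, hcnt, hloop⟩ := loopA_eq c (c.length + 1) 0 0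
  simp only [zero_add] at hcnt hloop
  rw [hcnt, hloop, backB_eq_gBack]
  simp
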